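-- pv_equiv track=rewrite | github.com/RemcoCoppens/QDR_Table_Extractor | pdf_parser/textual_parser.py | combine_close_words
-- ===== SOURCE A (Python) =====
-- from typing import List, Tuple, Union, IO
--
-- def combine_close_words(
--         rows: List[List[Tuple]], word_spacing: int = 4
-- ) -> List[List[Tuple]]:
--     """
--     Args:
--         rows (List[List[Tuple]]): Collection of words per row.
--                 Formatted as: (text, x_left, x_right, y_top, y_bottom)
--         word_spacing (int, optional): The space between words. Defaults to 4.
--
--     Returns:
--         List[List[Tuple]]: New collection of words per row, combined using word spacing.
--     """
--     merged_rows = []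
--     for row in rows:
--         if not row:
--             merged_rows.append([])
--             continue
--
--         merged_words = [row[0]]
--
--         for i in range(1, len(row)):
--             last_word = merged_words[-1]
--             current_word = row[i]
--             gap = abs(last_word[2] - current_word[1])
--
--             if gap <= word_spacing:
--                 combined_text = last_word[0] + " " + current_word[0]
--                 new_x_right = current_word[2]
--
--                 merged_words[-1] = (
--                     combined_text, last_word[1], new_x_right,
--                     last_word[3], last_word[4],
--                 )
--             else:
--                 merged_words.append(current_word)
--
--         merged_rows.append(merged_words)
--
--     return merged_rows
-- ===== SOURCE B (Python) =====
-- from typing import List, Tuple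
--
--
-- def _reduce(group: List[Tuple]) -> Tuple:
--     first = group[0]
--     last = group[-1]
--     return (
--         " ".join(w[0] for w in group),
--         first[1], last[2], first[3], first[4],
--     )
--
--
-- def combine_close_words(
--         rows: List[List[Tuple]], word_spacing: int = 4
-- ) -> List[List[Tuple]]:
--     out = []
--     for row in rows:
--         groups: List[List[Tuple]] = []
--         for w in row:
--             if groups and abs(groups[-1][-1][2] - w[1]) <= word_spacing:
--                 groups[-1].append(w)
--             else:
--                 groups.append([w])
--         out.append([_reduce(g) for g in groups])
--     return out
-- ===== Notes on version B (the rewrite author's own statement) =====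
-- stated objective: alternative
-- what changed: Replaces A's single incremental loop that repeatedly rewrites the last merged tuple with a group-then-reduce pipeline: first partition each row into maximal runs of horizontally close words, then collapse each run once (join texts, first word's left/y coordinates, last word's right edge).
import Mathlib
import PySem

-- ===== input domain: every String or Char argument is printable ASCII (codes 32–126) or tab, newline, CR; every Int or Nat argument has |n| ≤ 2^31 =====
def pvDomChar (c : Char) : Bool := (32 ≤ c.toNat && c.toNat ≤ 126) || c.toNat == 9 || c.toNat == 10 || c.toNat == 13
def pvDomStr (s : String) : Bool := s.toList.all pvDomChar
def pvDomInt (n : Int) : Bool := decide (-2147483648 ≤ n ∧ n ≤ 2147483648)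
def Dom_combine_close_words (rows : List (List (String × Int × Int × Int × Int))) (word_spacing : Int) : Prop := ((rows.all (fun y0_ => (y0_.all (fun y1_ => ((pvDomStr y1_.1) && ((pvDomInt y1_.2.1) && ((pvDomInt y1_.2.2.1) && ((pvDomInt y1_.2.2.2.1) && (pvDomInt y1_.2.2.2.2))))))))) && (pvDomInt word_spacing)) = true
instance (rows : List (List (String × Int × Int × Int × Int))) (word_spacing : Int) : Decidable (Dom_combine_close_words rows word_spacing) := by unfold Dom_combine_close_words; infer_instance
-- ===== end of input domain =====

-- B replaces A's incremental rewrite-the-last-merged-tuple loop by a group-then-reduce pipeline (alternative decomposition, same cost).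


abbrev PWord := String × Int × Int × Int × Int

-- ===== PORT A =====
-- merged_words is kept in REVERSE order (head = merged_words[-1]); the [] case of the
-- accumulator is unreachable (the fold starts from [row[0]]).
def stepA (word_spacing : Int) (acc : List PWord) (w : PWord) : List PWord :=
  match acc with
  | [] => [w]
  | last :: rest =>
    if |last.2.2.1 - w.2.1| ≤ word_spacing then
      (last.1 ++ " " ++ w.1, last.2.1, w.2.2.1, last.2.2.2.1, last.2.2.2.2) :: rest
    else
      w :: last :: rest

def combine_close_words (rows : List (List PWord)) (word_spacing : Int) : List (List PWord) :=
  rows.map (fun row =>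
    match row with
    | [] => []
    | h :: t => (t.foldl (stepA word_spacing) [h]).reverse)

-- ===== PORT B =====
-- " ".join(...) ported step for step (exact for any strings).
def joinSp : List String → String
  | [] => ""
  | [x] => x
  | x :: xs => x ++ " " ++ joinSp xs

-- Collapse one maximal group of close words into a single tuple ([] is unreachable).
def reduceB (g : List PWord) : PWord :=
  match g with
  | [] => ("", 0, 0, 0, 0)
  | f :: rest =>
    (joinSp ((f :: rest).map (·.1)), f.2.1, (rest.getLastD f).2.2.1, f.2.2.2.1, f.2.2.2.2)

-- Partition a row into maximal runs of close words; the current group is kept reversed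
-- with its most recent word c at the head.
def groupsB (word_spacing : Int) (c : PWord) (cs : List PWord) : List PWord → List (List PWord)
  | [] => [(c :: cs).reverse]
  | w :: ws =>
    if |c.2.2.1 - w.2.1| ≤ word_spacing then groupsB word_spacing w (c :: cs) ws
    else (c :: cs).reverse :: groupsB word_spacing w [] ws

def combine_close_words_alt (rows : List (List PWord)) (word_spacing : Int) : List (List PWord) :=
  rows.map (fun row =>
    match row with
    | [] => []
    | h :: t => (groupsB word_spacing h [] t).map reduceB)

-- ===== PRECONDITION & SPEC =====
def Spec_combine_close_words (rows : List (List (String × Int × Int × Int × Int))) (word_spacing : Int) (out : List (List (String × Int × Int × Int × Int))) : Prop := out = combine_close_words_alt rows word_spacing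
instance (rows : List (List (String × Int × Int × Int × Int))) (word_spacing : Int) (out : List (List (String × Int × Int × Int × Int))) : Decidable (Spec_combine_close_words rows word_spacing out) := by unfold Spec_combine_close_words; infer_instance

-- ===== CLAIM (what is proved, stated in full; the proofs are below) =====
def Claim_equal_combine_close_words : Prop := ∀ (rows : List (List (String × Int × Int × Int × Int))) (word_spacing : Int), Dom_combine_close_words rows word_spacing → Spec_combine_close_words rows word_spacing (combine_close_words rows word_spacing)

-- ===== LEMMAS AND PROOFS =====

theorem joinSp_snoc (y : String) (x : String) (xs : List String) :
    joinSp ((x :: xs) ++ [y]) = joinSp (x :: xs) ++ " " ++ y := by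
  induction xs generalizing x with
  | nil => rfl
  | cons a as ih =>
    simp only [List.cons_append]
    rw [show joinSp (x :: a :: (as ++ [y])) = x ++ " " ++ joinSp ((a :: as) ++ [y]) from rfl,
      show joinSp (x :: a :: as) = x ++ " " ++ joinSp (a :: as) from rfl, ih a]
    simp [String.append_assoc]

theorem getLastD_concat' {α : Type} (l : List α) (c d : α) : (l ++ [c]).getLastD d = c := by
  induction l generalizing d with
  | nil => rfl
  | cons a l ih => rw [List.cons_append, List.getLastD_cons, ih]

theorem reduceB_singleton (h : PWord) : reduceB [h] = h := by
  simp [reduceB, joinSp]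

theorem reduceB_xright (c : PWord) (cs : List PWord) :
    (reduceB ((c :: cs).reverse)).2.2.1 = c.2.2.1 := by
  rw [List.reverse_cons]
  rcases h : cs.reverse with _ | ⟨f, r⟩
  · simp [reduceB]
  · simp [reduceB]

theorem reduceB_snoc (c w : PWord) (cs : List PWord) :
    reduceB ((c :: cs).reverse ++ [w])
      = ((reduceB ((c :: cs).reverse)).1 ++ " " ++ w.1,
         (reduceB ((c :: cs).reverse)).2.1, w.2.2.1,
         (reduceB ((c :: cs).reverse)).2.2.2.1, (reduceB ((c :: cs).reverse)).2.2.2.2) := by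
  rw [List.reverse_cons]
  rcases h : cs.reverse with _ | ⟨f, r⟩
  · simp [reduceB, joinSp]
  · simp only [List.cons_append, List.append_assoc, reduceB, List.map_cons, List.map_append,
      List.map_nil]
    have h1 : (r ++ c :: ([] ++ [w])).getLastD f = w := by
      rw [show r ++ c :: ([] ++ [w]) = (r ++ [c]) ++ [w] from by simp, getLastD_concat']
    have h2 : joinSp (f.1 :: (List.map (fun x => x.1) r ++ c.1 :: ([] ++ [w.1])))
        = joinSp (f.1 :: (List.map (fun x => x.1) r ++ [c.1])) ++ " " ++ w.1 := by
      rw [show f.1 :: (List.map (fun x => x.1) r ++ c.1 :: ([] ++ [w.1]))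
            = ((f.1 :: (List.map (fun x => x.1) r ++ [c.1])) ++ [w.1]) from by simp, joinSp_snoc]
    rw [h1, h2]

-- fold/groups correspondence: the head of A's accumulator is the reduction of the
-- current (reversed) group, the tail collects the finished merged words in reverse.
theorem fold_groups (s : Int) (t : List PWord) :
    ∀ (c : PWord) (cs rest : List PWord),
      (t.foldl (stepA s) (reduceB ((c :: cs).reverse) :: rest)).reverse
        = rest.reverse ++ (groupsB s c cs t).map reduceB := by
  induction t with
  | nil => intro c cs rest; simp [groupsB]
  | cons w ws ih =>
    intro c cs rest
    simp only [List.foldl_cons, stepA, groupsB, reduceB_xright]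
    by_cases hgap : |c.2.2.1 - w.2.1| ≤ s
    · rw [if_pos hgap, if_pos hgap]
      have := ih w (c :: cs) rest
      rw [show (w :: c :: cs).reverse = (c :: cs).reverse ++ [w] from by simp] at this
      rw [reduceB_snoc] at this
      exact this
    · rw [if_neg hgap, if_neg hgap]
      have := ih w [] (reduceB ((c :: cs).reverse) :: rest)
      simpa [reduceB_singleton] using this

-- ===== VERDICT (by name: the statement is the Claim_ definition above) =====
theorem combine_close_words_spec : Claim_equal_combine_close_words := by
  intro rows word_spacing _
  unfold Spec_combine_close_words combine_close_words combine_close_words_alt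
  refine List.map_congr_left ?_
  intro row _
  rcases row with _ | ⟨h, t⟩
  · rfl
  · have := fold_groups word_spacing t h [] []
    simpa [reduceB_singleton] using this
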